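-- pv_equiv track=rewrite | github.com/parisakianmajd/codeLab | miscellaneous/subsetsWithDups.py | helper
-- ===== SOURCE A (Python) =====
-- def helper(nums):
--         if not nums:
--             return [[]]
--         else:
--             first = nums[0]
--             subs = helper(nums[1:])
--             newl = []
--             for i in subs:
--                 if i not in newl:
--                     newl.append(i)
--                 l = [first]+i
--                 if l not in newl:
--                     newl.append(l)
--             return newl
-- ===== SOURCE B (Python) =====
-- def helper(nums):
--     result = [[]]
--     for first in reversed(nums):
--         newl = []
--         seen = set()
--         for i in result:
--             t = tuple(i)
--             if t not in seen:
--                 newl.append(i)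
--                 seen.add(t)
--             l = [first] + i
--             tl = tuple(l)
--             if tl not in seen:
--                 newl.append(l)
--                 seen.add(tl)
--         result = newl
--     return result
-- ===== Notes on version B (the rewrite author's own statement) =====
-- stated objective: alternative
-- what changed: Replaces A's recursion with an explicit iterative fold over reversed(nums) and replaces A's 'not in newl' linear list scans by a hash-set of seen subsets, so each level is built in one pass without inner membership scans.
import Mathlib
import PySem

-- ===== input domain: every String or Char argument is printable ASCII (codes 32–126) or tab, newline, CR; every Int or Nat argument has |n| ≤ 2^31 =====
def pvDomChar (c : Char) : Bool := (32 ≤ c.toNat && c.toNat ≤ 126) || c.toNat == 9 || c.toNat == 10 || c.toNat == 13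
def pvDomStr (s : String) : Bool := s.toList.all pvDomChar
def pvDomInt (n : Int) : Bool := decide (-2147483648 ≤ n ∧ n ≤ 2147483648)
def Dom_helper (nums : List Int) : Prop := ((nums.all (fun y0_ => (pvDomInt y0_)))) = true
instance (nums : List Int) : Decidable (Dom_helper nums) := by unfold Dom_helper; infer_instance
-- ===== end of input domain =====

-- B rewrites A's recursion as an iterative fold over reversed(nums) and replaces the
-- quadratic list-membership dedup of each level by a set ('alternative' decomposition).

-- ===== PORT A =====
-- body of A's `for i in subs:` loop (newl is the accumulator being appended to)
def bodyA (first : Int) (newl : List (List Int)) (i : List Int) : List (List Int) :=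
  let newl1 := if newl.contains i then newl else newl ++ [i]
  let l := [first] ++ i
  if newl1.contains l then newl1 else newl1 ++ [l]

def helper (nums : List Int) : List (List Int) :=
  match nums with
  | [] => [[]]
  | first :: rest =>
    let subs := helper rest
    subs.foldl (bodyA first) []

-- ===== PORT B =====
-- body of B's `for i in result:` loop; the state is the pair (newl, seen)
def bodyB (first : Int) (p : List (List Int) × PySem.Set (List Int)) (i : List Int) :
    List (List Int) × PySem.Set (List Int) :=
  let p1 := if PySem.Set.contains p.2 i then p else (p.1 ++ [i], PySem.Set.add p.2 i)
  let l := [first] ++ i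
  if PySem.Set.contains p1.2 l then p1 else (p1.1 ++ [l], PySem.Set.add p1.2 l)

def helper_alt (nums : List Int) : List (List Int) :=
  nums.reverse.foldl
    (fun result first => (result.foldl (bodyB first) ([], PySem.Set.empty)).1)
    [[]]

-- ===== PRECONDITION & SPEC =====
def Spec_helper (nums : List Int) (out : List (List Int)) : Prop := out = helper_alt nums
instance (nums : List Int) (out : List (List Int)) : Decidable (Spec_helper nums out) := by unfold Spec_helper; infer_instance

-- ===== CLAIM (what is proved, stated in full; the proofs are below) =====
def Claim_equal_helper : Prop := ∀ (nums : List Int), Dom_helper nums → Spec_helper nums (helper nums)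

-- ===== LEMMAS AND PROOFS =====

-- one loop step: if seen has the same members as newl, B's step produces A's list
-- and the correspondence persists
lemma body_step (first : Int) (newl : List (List Int)) (seen : PySem.Set (List Int))
    (i : List Int) (h : ∀ x, x ∈ seen ↔ x ∈ newl) :
    (bodyB first (newl, seen) i).1 = bodyA first newl i ∧
    (∀ x, x ∈ (bodyB first (newl, seen) i).2 ↔ x ∈ bodyA first newl i) := by
  have hne : (first :: i) ≠ i := by
    intro hcontra
    exact absurd (congrArg List.length hcontra) (by simp)
  unfold bodyA bodyB PySem.Set.contains PySem.Set.add
  simp only [List.contains_eq_mem, decide_eq_true_eq]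
  by_cases hi : i ∈ newl <;> by_cases hl : (first :: i) ∈ newl <;>
    simp [hi, hl, h, hne, List.mem_append]

-- B's inner fold, started in a state whose set matches its list, computes A's inner fold
lemma inner_eq (first : Int) (subs : List (List Int)) :
    ∀ (newl : List (List Int)) (seen : PySem.Set (List Int)),
    (∀ x, x ∈ seen ↔ x ∈ newl) →
    (subs.foldl (bodyB first) (newl, seen)).1 = subs.foldl (bodyA first) newl := by
  induction subs with
  | nil => intro newl seen _; rfl
  | cons i rest ih =>
    intro newl seen h
    obtain ⟨h1, h2⟩ := body_step first newl seen i h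
    simp only [List.foldl_cons]
    have hsplit : bodyB first (newl, seen) i
        = ((bodyB first (newl, seen) i).1, (bodyB first (newl, seen) i).2) := rfl
    rw [hsplit, h1]
    exact ih _ _ h2

-- the two level-building steps coincide (B's starting set is empty, like its list)
lemma level_eq (first : Int) (subs : List (List Int)) :
    (subs.foldl (bodyB first) ([], PySem.Set.empty)).1 = subs.foldl (bodyA first) [] := by
  exact inner_eq first subs [] PySem.Set.empty (fun x => by simp [PySem.Set.empty])

lemma helper_eq_alt (nums : List Int) : helper nums = helper_alt nums := by
  unfold helper_alt
  rw [List.foldl_reverse]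
  induction nums with
  | nil => rfl
  | cons first rest ih =>
    simp only [List.foldr_cons]
    rw [← ih]
    show (helper rest).foldl (bodyA first) [] = _
    rw [level_eq]

-- ===== VERDICT (by name: the statement is the Claim_ definition above) =====
theorem helper_spec : Claim_equal_helper := by
  intro nums _
  unfold Spec_helper
  exact helper_eq_alt nums
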